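-- pv_equiv track=rewrite | github.com/dream-lab/XFaaS | serwo/get_container_aws.py | add_lists_by_index
-- ===== SOURCE A (Python) =====
-- def add_lists_by_index(list1, list2):
--     max_size = max(len(list1), len(list2))  # Determine the maximum size of the resultant list
--     result = []
--
--     for i in range(max_size):
--         element1 = list1[i] if i < len(list1) else 0  # Use 0 if index is out of range for list1
--         element2 = list2[i] if i < len(list2) else 0  # Use 0 if index is out of range for list2
--         result.append(element1 + element2)
--
--     return result
-- ===== SOURCE B (Python) =====
-- def add_lists_by_index(list1, list2):
--     n = min(len(list1), len(list2))
--     result = [list1[i] + list2[i] for i in range(n)]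
--     result += list1[n:] if len(list1) > len(list2) else list2[n:]
--     return result
-- ===== Notes on version B (the rewrite author's own statement) =====
-- stated objective: alternative
-- what changed: Replaces A's single zero-padded index loop over max(len1,len2) with a two-phase decomposition: sum the overlapping prefix of length min(len1,len2) in a comprehension, then append the longer list's remaining tail via one slice.
import Mathlib
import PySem

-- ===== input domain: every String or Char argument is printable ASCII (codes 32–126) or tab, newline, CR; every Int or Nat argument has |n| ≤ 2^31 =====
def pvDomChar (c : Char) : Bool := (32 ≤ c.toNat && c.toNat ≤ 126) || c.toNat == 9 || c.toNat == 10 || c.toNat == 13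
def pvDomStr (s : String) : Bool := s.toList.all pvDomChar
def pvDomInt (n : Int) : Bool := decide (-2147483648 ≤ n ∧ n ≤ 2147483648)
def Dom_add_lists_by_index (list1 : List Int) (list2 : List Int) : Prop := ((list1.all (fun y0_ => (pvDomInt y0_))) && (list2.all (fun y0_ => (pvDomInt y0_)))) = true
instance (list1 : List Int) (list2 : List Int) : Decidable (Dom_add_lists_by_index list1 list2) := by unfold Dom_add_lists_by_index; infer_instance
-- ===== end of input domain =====

-- B sums the overlapping prefix and then appends the longer list's tail, instead of A's single zero-padded loop over max(len1,len2); alternative decomposition, same cost.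

-- ===== PORT A =====
-- A: loop i in range(max(len1,len2)), appending (list1[i] if in range else 0) + (list2[i] if in range else 0)
def add_lists_by_index (list1 : List Int) (list2 : List Int) : List Int :=
  (List.range (max list1.length list2.length)).foldl
    (fun result i =>
      result ++ [(if i < list1.length then list1.getD i 0 else 0) +
                 (if i < list2.length then list2.getD i 0 else 0)]) []

-- ===== PORT B =====
-- B: n = min of lengths; comprehension over range(n) of list1[i]+list2[i] (in range, so getD's default is never used); then the longer tail list1[n:] / list2[n:]
def add_lists_by_index_alt (list1 : List Int) (list2 : List Int) : List Int :=
  let n := min list1.length list2.length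
  ((List.range n).map (fun i => list1.getD i 0 + list2.getD i 0)) ++
    (if list1.length > list2.length then list1.drop n else list2.drop n)

-- ===== PRECONDITION & SPEC =====
def Spec_add_lists_by_index (list1 : List Int) (list2 : List Int) (out : List Int) : Prop := out = add_lists_by_index_alt list1 list2
instance (list1 : List Int) (list2 : List Int) (out : List Int) : Decidable (Spec_add_lists_by_index list1 list2 out) := by unfold Spec_add_lists_by_index; infer_instance

-- ===== CLAIM (what is proved, stated in full; the proofs are below) =====
def Claim_equal_add_lists_by_index : Prop := ∀ (list1 : List Int) (list2 : List Int), Dom_add_lists_by_index list1 list2 → Spec_add_lists_by_index list1 list2 (add_lists_by_index list1 list2)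

-- ===== LEMMAS AND PROOFS =====

-- A's append-loop is a map over the index range
theorem add_lists_by_index_eq_map (list1 list2 : List Int) :
    add_lists_by_index list1 list2 =
      (List.range (max list1.length list2.length)).map
        (fun i => (if i < list1.length then list1.getD i 0 else 0) +
                  (if i < list2.length then list2.getD i 0 else 0)) := by
  unfold add_lists_by_index
  rw [PySem.List.foldl_append_singleton_eq_map]
  rfl

theorem add_lists_by_index_alt_length (list1 list2 : List Int) :
    (add_lists_by_index_alt list1 list2).length = max list1.length list2.length := by
  unfold add_lists_by_index_alt
  simp only [List.length_append, List.length_map, List.length_range]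
  split_ifs <;> simp [List.length_drop] <;> omega

-- ===== VERDICT (by name: the statement is the Claim_ definition above) =====
theorem add_lists_by_index_spec : Claim_equal_add_lists_by_index := by
  intro list1 list2 _
  unfold Spec_add_lists_by_index
  rw [add_lists_by_index_eq_map]
  apply List.ext_getElem
  · simp [add_lists_by_index_alt_length]
  · intro i h1 h2
    simp only [List.getElem_map, List.getElem_range]
    simp only [List.length_map, List.length_range] at h1
    unfold add_lists_by_index_alt
    simp only []
    by_cases hov : i < min list1.length list2.length
    · rw [List.getElem_append_left (by simpa using hov)]
      simp [Nat.lt_of_lt_of_le hov (Nat.min_le_left _ _),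
            Nat.lt_of_lt_of_le hov (Nat.min_le_right _ _)]
    · rw [List.getElem_append_right (by simp only [List.length_map, List.length_range]; omega)]
      by_cases hgt : list1.length > list2.length
      · simp only [hgt, if_pos]
        have hmin : min list1.length list2.length = list2.length := by omega
        have hi1 : i < list1.length := by omega
        have hi2 : ¬ i < list2.length := by omega
        simp [List.getElem_drop, hmin, hi1, hi2]
        congr 1
        omega
      · simp only [hgt, if_false]
        have hmin : min list1.length list2.length = list1.length := by omega
        have hi2 : i < list2.length := by omega
        have hi1 : ¬ i < list1.length := by omega
        simp [List.getElem_drop, hmin, hi1, hi2]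
        congr 1
        omega
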